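-- pv_equiv track=rewrite | github.com/m1sterzer0/DaveProgrammingCompetitions | hackercup/python/2021/1_A2.py | solveA1
-- ===== SOURCE A (Python) =====
-- def solveA1(N,S) :
--     last = 'F'
--     ans = 0
--     for c in S :
--         if c == 'O' :
--             if last == 'X' : ans += 1
--             last = 'O'
--         elif c == 'X' :
--             if last == 'O' : ans += 1
--             last = 'X'
--     return ans
-- ===== SOURCE B (Python) =====
-- def solveA1(N, S):
--     t = [c for c in S if c == 'O' or c == 'X']
--     return sum(1 for a, b in zip(t, t[1:]) if a != b)
-- ===== Notes on version B (the rewrite author's own statement) =====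
-- stated objective: simpler
-- what changed: Replaces the stateful single pass carrying a last-character register with a filter to the relevant characters followed by a pairwise adjacent-difference count.
import Mathlib
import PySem

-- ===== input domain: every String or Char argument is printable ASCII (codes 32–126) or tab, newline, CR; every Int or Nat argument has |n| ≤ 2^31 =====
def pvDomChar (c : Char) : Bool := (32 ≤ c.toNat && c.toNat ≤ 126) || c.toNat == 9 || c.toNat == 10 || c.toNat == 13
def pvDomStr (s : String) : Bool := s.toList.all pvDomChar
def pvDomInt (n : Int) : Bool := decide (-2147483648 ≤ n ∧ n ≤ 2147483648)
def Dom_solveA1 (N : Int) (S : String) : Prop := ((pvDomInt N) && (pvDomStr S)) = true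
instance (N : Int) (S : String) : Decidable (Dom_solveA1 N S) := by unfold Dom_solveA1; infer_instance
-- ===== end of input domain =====

-- B is a simpler decomposition: filter the O/X characters, then count adjacent differing pairs.

-- ===== PORT A =====
-- A's for-loop over S with state (last, ans), transliterated as structural recursion.
def pvALoop (last : Char) (ans : Int) : List Char → Int
  | [] => ans
  | c :: r =>
    if c = 'O' then pvALoop 'O' (if last = 'X' then ans + 1 else ans) r
    else if c = 'X' then pvALoop 'X' (if last = 'O' then ans + 1 else ans) r
    else pvALoop last ans r

def solveA1 (N : Int) (S : String) : Int := pvALoop 'F' 0 S.toList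

-- ===== PORT B =====
-- sum(1 for a,b in zip(t, t[1:]) if a != b), as recursion over the filtered list.
def pvPairCount : List Char → Int
  | a :: b :: r => (if a ≠ b then 1 else 0) + pvPairCount (b :: r)
  | _ => 0

def solveA1_alt (N : Int) (S : String) : Int :=
  pvPairCount (S.toList.filter (fun c => c == 'O' || c == 'X'))

-- ===== PRECONDITION & SPEC =====
def Spec_solveA1 (N : Int) (S : String) (out : Int) : Prop := out = solveA1_alt N S
instance (N : Int) (S : String) (out : Int) : Decidable (Spec_solveA1 N S out) := by unfold Spec_solveA1; infer_instance

-- ===== CLAIM (what is proved, stated in full; the proofs are below) =====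
def Claim_equal_solveA1 : Prop := ∀ (N : Int) (S : String), Dom_solveA1 N S → Spec_solveA1 N S (solveA1 N S)

-- ===== LEMMAS AND PROOFS =====
lemma pvALoop_eq (l : List Char) : ∀ (last : Char) (ans : Int),
    pvALoop last ans l =
      ans + (if last = 'O' ∨ last = 'X'
             then pvPairCount (last :: l.filter (fun c => c == 'O' || c == 'X'))
             else pvPairCount (l.filter (fun c => c == 'O' || c == 'X'))) := by
  induction l with
  | nil => intro last ans; simp [pvALoop, pvPairCount]
  | cons c r ih =>
    intro last ans
    by_cases hO : c = 'O'
    · subst hO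
      simp only [pvALoop, List.filter_cons, ih]
      by_cases hX : last = 'X' <;>
        simp [hX, pvPairCount] <;> ring
    · by_cases hX : c = 'X'
      · subst hX
        have hne : ('X' : Char) ≠ 'O' := by decide
        simp only [pvALoop, hne, List.filter_cons, ih]
        by_cases hA : last = 'O' <;>
          simp [hA, pvPairCount] <;> ring
      · simp only [pvALoop, if_neg hO, if_neg hX, List.filter_cons, ih]
        have : (c == 'O' || c == 'X') = false := by
          simp [hO, hX]
        simp [this]

-- ===== VERDICT (by name: the statement is the Claim_ definition above) =====
theorem solveA1_spec : Claim_equal_solveA1 := by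
  intro N S _
  unfold Spec_solveA1 solveA1 solveA1_alt
  rw [pvALoop_eq]
  simp
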